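-- pv_equiv track=rewrite | github.com/BlackMautz/Sims4DuplicateScanner | sims4_scanner/tray_portraits.py | match_renamed_sims
-- ===== SOURCE A (Python) =====
-- def match_renamed_sims(portrait_index: dict[str, str],
--                        tray_households: list,
--                        savegame_households: dict[str, list[str]]) -> dict[str, str]:
--     """Matcht umbenannte Sims über Haushalt-Zugehörigkeit.
--
--     Wenn in einem Savegame-Haushalt einige Sims per Name ein Portrait haben,
--     aber andere nicht, versucht diese Funktion die übrigen SGI-Portraits
--     aus dem passenden Tray-Haushalt zuzuordnen.
--
--     Args:
--         portrait_index: Index von build_portrait_index()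
--         tray_households: Tray-Haushalte von build_portrait_index()
--         savegame_households: {household_name: [full_name, ...]}
--
--     Returns:
--         Zusätzliche Zuordnungen {savegame_name: sgi_path}
--     """
--     if not tray_households or not isinstance(tray_households, list):
--         return {}
--
--     extra: dict[str, str] = {}
--
--     for hh_name, save_members in savegame_households.items():
--         # Welche Savegame-Sims haben schon ein Portrait?
--         matched_save = {n for n in save_members if n in portrait_index}
--         unmatched_save = [n for n in save_members if n not in portrait_index]
--         if not unmatched_save:
--             continue  # Alle haben schon Portraits
--
--         # Finde den Tray-Haushalt mit den meisten Namens-Treffern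
--         best_tray_hh = None
--         best_score = 0
--         for tray_hh in tray_households:
--             tray_names = {name for name, _ in tray_hh}
--             overlap = matched_save & tray_names
--             if len(overlap) > best_score:
--                 best_score = len(overlap)
--                 best_tray_hh = tray_hh
--
--         if not best_tray_hh or best_score == 0:
--             continue  # Kein Tray-Haushalt passt
--
--         # Welche Tray-Sims wurden noch nicht zugeordnet?
--         tray_matched_names = {name for name, _ in best_tray_hh if name in matched_save}
--         tray_unmatched = [(name, path) for name, path in best_tray_hh
--                           if name not in tray_matched_names]
--
--         # Wenn genau gleich viele übrig sind → 1:1 zuordnen (nach Position)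
--         if len(tray_unmatched) == len(unmatched_save):
--             for save_name, (_, sgi_path) in zip(unmatched_save, tray_unmatched):
--                 extra[save_name] = sgi_path
--         elif len(tray_unmatched) == 1 and len(unmatched_save) >= 1:
--             # Nur 1 Tray-Sim übrig → dem ersten unmatched zuordnen
--             extra[unmatched_save[0]] = tray_unmatched[0][1]
--
--     return extra
-- ===== SOURCE B (Python) =====
-- def match_renamed_sims(portrait_index: dict[str, str],
--                        tray_households: list,
--                        savegame_households: dict[str, list[str]]) -> dict[str, str]:
--     """Inverted-index re-implementation: one pass builds name -> tray-household
--     indices, each savegame household then accumulates overlap counts per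
--     candidate instead of rescanning every tray household."""
--     if not tray_households or not isinstance(tray_households, list):
--         return {}
--
--     # inverted index: sim name -> indices of tray households containing it
--     index: dict[str, list[int]] = {}
--     for i in range(len(tray_households)):
--         seen: set[str] = set()
--         for name, _ in tray_households[i]:
--             if name not in seen:
--                 seen.add(name)
--                 index.setdefault(name, []).append(i)
--
--     extra: dict[str, str] = {}
--     for hh_name, members in savegame_households.items():
--         matched: set[str] = set()
--         unmatched: list[str] = []
--         for n in members:
--             if n in portrait_index:
--                 matched.add(n)
--             else:
--                 unmatched.append(n)
--         if not unmatched: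
--             continue
--
--         # overlap count per tray household, only touching households that
--         # actually share a name (set-iteration order cannot affect the counts)
--         counts = [0] * len(tray_households)
--         for n in matched:
--             for i in index.get(n, []):
--                 counts[i] += 1
--
--         # first index achieving the maximal positive count
--         best_i = None
--         best_score = 0
--         for i in range(len(counts)):
--             if counts[i] > best_score:
--                 best_score = counts[i]
--                 best_i = i
--         if best_i is None:
--             continue
--
--         best = tray_households[best_i]
--         tray_unmatched = [(n, p) for n, p in best if n not in matched]
--         if len(tray_unmatched) == len(unmatched):
--             for s, (_, p) in zip(unmatched, tray_unmatched):
--                 extra[s] = p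
--         elif len(tray_unmatched) == 1:
--             extra[unmatched[0]] = tray_unmatched[0][1]
--     return extra
-- ===== Notes on version B (the rewrite author's own statement) =====
-- stated objective: faster
-- what changed: Instead of rescanning every tray household (rebuilding its name set) for each savegame household, B builds one inverted name->tray-household-index map up front and, per savegame household, accumulates overlap counts only for tray households that actually share a name, then takes the first index with the maximal positive count.
import Mathlib
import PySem

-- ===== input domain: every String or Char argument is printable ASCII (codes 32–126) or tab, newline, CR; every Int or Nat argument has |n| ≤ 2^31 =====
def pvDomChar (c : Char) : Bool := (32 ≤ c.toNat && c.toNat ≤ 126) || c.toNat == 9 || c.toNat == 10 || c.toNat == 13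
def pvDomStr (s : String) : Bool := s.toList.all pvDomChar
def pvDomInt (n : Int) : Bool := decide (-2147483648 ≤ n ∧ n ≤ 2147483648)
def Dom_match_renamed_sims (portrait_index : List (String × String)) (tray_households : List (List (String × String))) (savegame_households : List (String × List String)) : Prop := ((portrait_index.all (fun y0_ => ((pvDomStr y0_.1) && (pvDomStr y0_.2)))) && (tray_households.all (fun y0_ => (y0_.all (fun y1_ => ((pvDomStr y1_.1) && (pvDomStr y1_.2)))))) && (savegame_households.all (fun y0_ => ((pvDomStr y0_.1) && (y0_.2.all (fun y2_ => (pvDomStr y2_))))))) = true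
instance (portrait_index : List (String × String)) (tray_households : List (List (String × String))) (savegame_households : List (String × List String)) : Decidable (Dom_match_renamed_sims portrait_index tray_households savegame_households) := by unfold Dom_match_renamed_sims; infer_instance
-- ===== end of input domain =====

-- B replaces A's per-household rescans of all tray households by a single inverted
-- name→tray-household index plus per-candidate overlap counters (objective: faster).


-- ===== PORT A =====

-- the inner "best tray household" scan of A: fold over tray_households keeping
-- (best_tray_hh, best_score); scores are Python ints, all nonnegative, kept as Nat
def pvA_best (matched : PySem.Set String) (trays : List (List (String × String))) :
    Option (List (String × String)) × Nat :=
  trays.foldl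
    (fun st tray_hh =>
      let tray_names : PySem.Set String := PySem.Set.ofList (tray_hh.map Prod.fst)
      let overlap : PySem.Set String := PySem.Set.inter matched tray_names
      if overlap.length > st.2 then (some tray_hh, overlap.length) else st)
    (none, 0)

-- A's loop body for one savegame household (extra is the dict being filled)
def pvA_step (pid : PySem.Dict String String) (trays : List (List (String × String)))
    (extra : PySem.Dict String String) (hh : String × List String) :
    PySem.Dict String String :=
  let save_members := hh.2
  let matched_save : PySem.Set String :=
    PySem.Set.ofList (save_members.filter (fun n => pid.contains n))
  let unmatched_save := save_members.filter (fun n => !(pid.contains n))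
  if unmatched_save.isEmpty then extra else
  let best := pvA_best matched_save trays
  match best.1 with
  | none => extra   -- "if not best_tray_hh or best_score == 0: continue" (None case)
  | some best_tray_hh =>
    if best_tray_hh.isEmpty || best.2 == 0 then extra else
    let tray_matched_names : PySem.Set String :=
      PySem.Set.ofList ((best_tray_hh.map Prod.fst).filter (fun n => matched_save.contains n))
    let tray_unmatched := best_tray_hh.filter (fun p => !(tray_matched_names.contains p.1))
    if tray_unmatched.length == unmatched_save.length then
      (unmatched_save.zip tray_unmatched).foldl (fun d q => d.insert q.1 q.2.2) extra
    else if tray_unmatched.length == 1 && decide (1 ≤ unmatched_save.length) then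
      -- unmatched_save[0] / tray_unmatched[0]: both lists provably nonempty here
      match unmatched_save, tray_unmatched with
      | s0 :: _, t0 :: _ => extra.insert s0 t0.2
      | _, _ => extra
    else extra

def match_renamed_sims (portrait_index : List (String × String)) (tray_households : List (List (String × String))) (savegame_households : List (String × List String)) : List (String × String) :=
  if tray_households.isEmpty then [] else
  let pid := PySem.Dict.mk portrait_index
  (savegame_households.foldl (pvA_step pid tray_households) PySem.Dict.empty).items

-- ===== PORT B =====

-- counts[i] += 1 (i is always a valid index when B uses it)
def pvBump : List Nat → Nat → List Nat
  | [], _ => []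
  | c :: cs, 0 => (c + 1) :: cs
  | c :: cs, Nat.succ n => c :: pvBump cs n

-- inverted index: name -> indices of tray households containing it
-- (index.setdefault(name, []).append(i)  ==  insert name (old-or-[] ++ [i]))
def pvB_index (trays : List (List (String × String))) : PySem.Dict String (List Nat) :=
  (List.range trays.length).foldl
    (fun idx i =>
      ((trays.getD i []).foldl
        (fun (st : PySem.Set String × PySem.Dict String (List Nat)) p =>
          if st.1.contains p.1 then st
          else (PySem.Set.add st.1 p.1, st.2.insert p.1 (st.2.getD p.1 [] ++ [i])))
        ((PySem.Set.empty : PySem.Set String), idx)).2)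
    PySem.Dict.empty

-- the overlap counters for one savegame household
def pvB_counts (idx : PySem.Dict String (List Nat)) (nTrays : Nat)
    (matched : PySem.Set String) : List Nat :=
  matched.foldl (fun cs n => (idx.getD n []).foldl (fun cs i => pvBump cs i) cs)
    (List.replicate nTrays 0)

-- first index with the maximal positive count
def pvB_argmax (counts : List Nat) : Option Nat × Nat :=
  (List.range counts.length).foldl
    (fun st i => if counts.getD i 0 > st.2 then (some i, counts.getD i 0) else st)
    (none, 0)

-- B's loop body for one savegame household
def pvB_step (pid : PySem.Dict String String) (trays : List (List (String × String)))
    (idx : PySem.Dict String (List Nat))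
    (extra : PySem.Dict String String) (hh : String × List String) :
    PySem.Dict String String :=
  let st := hh.2.foldl
    (fun (st : PySem.Set String × List String) n =>
      if pid.contains n then (PySem.Set.add st.1 n, st.2) else (st.1, st.2 ++ [n]))
    ((PySem.Set.empty : PySem.Set String), [])
  let matched := st.1
  let unmatched := st.2
  if unmatched.isEmpty then extra else
  let bm := pvB_argmax (pvB_counts idx trays.length matched)
  match bm.1 with
  | none => extra
  | some bi =>
    let best := trays.getD bi []   -- bi < trays.length by construction
    let tray_unmatched := best.filter (fun p => !(matched.contains p.1))
    if tray_unmatched.length == unmatched.length then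
      (unmatched.zip tray_unmatched).foldl (fun d q => d.insert q.1 q.2.2) extra
    else if tray_unmatched.length == 1 then
      match unmatched, tray_unmatched with
      | s0 :: _, t0 :: _ => extra.insert s0 t0.2
      | _, _ => extra
    else extra

def match_renamed_sims_alt (portrait_index : List (String × String)) (tray_households : List (List (String × String))) (savegame_households : List (String × List String)) : List (String × String) :=
  if tray_households.isEmpty then [] else
  let pid := PySem.Dict.mk portrait_index
  let idx := pvB_index tray_households
  (savegame_households.foldl (pvB_step pid tray_households idx) PySem.Dict.empty).items

-- ===== PRECONDITION & SPEC =====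
def Spec_match_renamed_sims (portrait_index : List (String × String)) (tray_households : List (List (String × String))) (savegame_households : List (String × List String)) (out : List (String × String)) : Prop := out = match_renamed_sims_alt portrait_index tray_households savegame_households
instance (portrait_index : List (String × String)) (tray_households : List (List (String × String))) (savegame_households : List (String × List String)) (out : List (String × String)) : Decidable (Spec_match_renamed_sims portrait_index tray_households savegame_households out) := by unfold Spec_match_renamed_sims; infer_instance

-- ===== CLAIM (what is proved, stated in full; the proofs are below) =====
def Claim_equal_match_renamed_sims : Prop := ∀ (portrait_index : List (String × String)) (tray_households : List (List (String × String))) (savegame_households : List (String × List String)), Dom_match_renamed_sims portrait_index tray_households savegame_households → Spec_match_renamed_sims portrait_index tray_households savegame_households (match_renamed_sims portrait_index tray_households savegame_households)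

-- ===== LEMMAS AND PROOFS =====

-- splitting a savegame household into (matched-set, unmatched-list) in one pass
-- equals A's two comprehensions
theorem pv_split (p : String → Bool) (members : List String)
    (s : PySem.Set String) (u : List String) :
    members.foldl (fun (st : PySem.Set String × List String) n =>
      if p n then (PySem.Set.add st.1 n, st.2) else (st.1, st.2 ++ [n])) (s, u)
    = (PySem.Set.update s (members.filter p), u ++ members.filter (fun n => !(p n))) := by
  induction members generalizing s u with
  | nil => simp [PySem.Set.update_nil]
  | cons x xs ih =>
    by_cases h : p x
    · simp [h, ih, PySem.Set.update_cons]
    · simp [h, ih, List.append_assoc]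

theorem pvBump_length (cs : List Nat) (i : Nat) : (pvBump cs i).length = cs.length := by
  induction cs generalizing i with
  | nil => rfl
  | cons c cs ih => cases i <;> simp [pvBump, ih]

theorem pvBump_getD (cs : List Nat) (i j : Nat) :
    (pvBump cs i).getD j 0 = cs.getD j 0 + (if i = j ∧ j < cs.length then 1 else 0) := by
  induction cs generalizing i j with
  | nil => simp [pvBump]
  | cons c cs ih =>
    cases i with
    | zero => cases j <;> simp [pvBump]
    | succ i =>
      cases j with
      | zero => simp [pvBump]
      | succ j => simpa [pvBump, Nat.succ_lt_succ_iff] using ih i j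

theorem foldl_pvBump_getD (l : List Nat) (cs : List Nat) (j : Nat)
    (h : ∀ i ∈ l, i < cs.length) :
    (l.foldl pvBump cs).getD j 0 = cs.getD j 0 + l.count j := by
  induction l generalizing cs with
  | nil => simp
  | cons i l ih =>
    have hlen : (pvBump cs i).length = cs.length := pvBump_length cs i
    have h' : ∀ i' ∈ l, i' < (pvBump cs i).length := by
      intro i' hi'; rw [hlen]; exact h i' (List.mem_cons_of_mem _ hi')
    rw [List.foldl_cons, ih _ h', pvBump_getD, List.count_cons]
    have hi : i < cs.length := h i List.mem_cons_self
    by_cases hij : i = j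
    · subst hij; simp [hi]; omega
    · simp [hij]

theorem foldl_pvBump_length (l : List Nat) (cs : List Nat) :
    (l.foldl pvBump cs).length = cs.length := by
  induction l generalizing cs with
  | nil => rfl
  | cons i l ih => rw [List.foldl_cons, ih, pvBump_length]

-- the name list of tray household i
def pvNames (trays : List (List (String × String))) (i : Nat) : List String :=
  (trays.getD i []).map Prod.fst

-- closed form of the inverted index entry for name n after households [0..k)
def pvIdxSpec (trays : List (List (String × String))) (k : Nat) (n : String) : List Nat :=
  (List.range k).filter (fun i => decide (n ∈ pvNames trays i))

theorem pv_inner_getD (ps : List (String × String)) (k : Nat)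
    (seen : PySem.Set String) (d : PySem.Dict String (List Nat)) (n : String) :
    ((ps.foldl (fun (st : PySem.Set String × PySem.Dict String (List Nat)) p =>
        if st.1.contains p.1 then st
        else (PySem.Set.add st.1 p.1, st.2.insert p.1 (st.2.getD p.1 [] ++ [k])))
      (seen, d)).2).getD n []
    = d.getD n [] ++ (if n ∈ ps.map Prod.fst ∧ n ∉ seen then [k] else []) := by
  induction ps generalizing seen d with
  | nil => simp
  | cons p ps ih =>
    rw [List.foldl_cons]
    by_cases hp : seen.contains p.1 = true
    · rw [if_pos hp, ih]
      have hpmem : p.1 ∈ seen := (PySem.Set.contains_iff seen p.1).1 hp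
      by_cases hn : n = p.1
      · subst hn; simp [hpmem]
      · simp only [List.map_cons, List.mem_cons, hn, false_or]
    · rw [if_neg hp, ih]
      have hpmem : p.1 ∉ seen := fun hm => hp ((PySem.Set.contains_iff seen p.1).2 hm)
      by_cases hn : n = p.1
      · subst hn
        rw [PySem.Dict.getD_insert_self]
        simp [hpmem]
      · rw [PySem.Dict.getD_insert_of_ne _ _ _ hn]
        simp only [List.map_cons, PySem.Set.mem_add, List.mem_cons, hn, false_or, not_or,
          not_false_eq_true, and_true]

theorem pvB_index_aux (trays : List (List (String × String))) (k : Nat) (n : String) :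
    (((List.range k).foldl
      (fun idx i =>
        ((trays.getD i []).foldl
          (fun (st : PySem.Set String × PySem.Dict String (List Nat)) p =>
            if st.1.contains p.1 then st
            else (PySem.Set.add st.1 p.1, st.2.insert p.1 (st.2.getD p.1 [] ++ [i])))
          ((PySem.Set.empty : PySem.Set String), idx)).2)
      PySem.Dict.empty)).getD n []
    = pvIdxSpec trays k n := by
  induction k with
  | zero => simp [pvIdxSpec, PySem.Dict.getD_empty]
  | succ k ih =>
    rw [List.range_succ, List.foldl_append, List.foldl_cons, List.foldl_nil,
      pv_inner_getD, ih]
    simp only [pvIdxSpec, List.range_succ, List.filter_append, List.filter_cons,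
      List.filter_nil]
    congr 1
    by_cases hm : n ∈ pvNames trays k
    · simp [pvNames] at hm; simp [pvNames, hm]
    · simp [pvNames] at hm; simp [pvNames, hm]

theorem pvB_index_getD (trays : List (List (String × String))) (n : String) :
    (pvB_index trays).getD n [] = pvIdxSpec trays trays.length n := by
  exact pvB_index_aux trays trays.length n

theorem pvIdxSpec_count (trays : List (List (String × String))) (k : Nat) (n : String) (j : Nat) :
    (pvIdxSpec trays k n).count j = if j < k ∧ n ∈ pvNames trays j then 1 else 0 := by
  have hnd : (pvIdxSpec trays k n).Nodup := (List.nodup_range).filter _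
  rw [List.Nodup.count hnd]
  by_cases h : j < k ∧ n ∈ pvNames trays j
  · simp [pvIdxSpec, List.mem_filter, List.mem_range, h]
  · simp only [pvIdxSpec, List.mem_filter, List.mem_range]
    rw [if_neg, if_neg h]
    simpa using h

theorem pvIdxSpec_lt (trays : List (List (String × String))) (k : Nat) (n : String) :
    ∀ i ∈ pvIdxSpec trays k n, i < k := by
  intro i hi
  simpa using (List.mem_filter.1 hi).1 |> List.mem_range.1

theorem pvB_counts_getD (trays : List (List (String × String))) (matched : List String) (j : Nat)
    (hj : j < trays.length) :
    (pvB_counts (pvB_index trays) trays.length matched).getD j 0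
      = (matched.filter (fun n => decide (n ∈ pvNames trays j))).length := by
  have aux : ∀ (m : List String) (cs : List Nat), cs.length = trays.length →
      (m.foldl (fun cs n => (((pvB_index trays).getD n []).foldl
          (fun cs i => pvBump cs i) cs)) cs).getD j 0
        = cs.getD j 0 + (m.filter (fun n => decide (n ∈ pvNames trays j))).length := by
    intro m
    induction m with
    | nil => intro cs _; simp
    | cons n ms ih =>
      intro cs hlen
      have hbnd : ∀ i ∈ (pvB_index trays).getD n [], i < cs.length := by
        intro i hi
        rw [hlen]
        exact lt_of_lt_of_le (pvIdxSpec_lt trays trays.length n i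
          (by rwa [← pvB_index_getD])) (le_refl _)
      rw [List.foldl_cons, ih _ (by rw [foldl_pvBump_length, hlen]),
        foldl_pvBump_getD _ _ _ hbnd, pvB_index_getD, pvIdxSpec_count]
      simp only [hj, true_and, List.filter_cons]
      by_cases hm : n ∈ pvNames trays j
      · simp [hm]; omega
      · simp [hm]
  rw [pvB_counts, aux matched _ (by simp)]
  simp

theorem pv_score_eq (matched : PySem.Set String) (hh : List (String × String)) :
    (PySem.Set.inter matched (PySem.Set.ofList (hh.map Prod.fst))).length
    = (matched.filter (fun n => decide (n ∈ hh.map Prod.fst))).length := by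
  unfold PySem.Set.inter
  congr 1
  apply List.filter_congr
  intro x _
  by_cases hm : x ∈ hh.map Prod.fst
  · simp [PySem.Set.mem_ofList, hm]
  · simp [PySem.Set.mem_ofList, hm]

-- a left fold is the fold over the index range (used to align A's scan with B's)
theorem pv_foldl_eq_range {α β : Type} (f : β → α → β) (l : List α) (d : α) (s : β) :
    l.foldl f s = (List.range l.length).foldl (fun s i => f s (l.getD i d)) s := by
  induction l using List.reverseRecOn with
  | nil => simp
  | append_singleton xs x ih =>
    rw [List.foldl_append, List.foldl_cons, List.foldl_nil, ih,
      List.length_append, List.length_cons, List.length_nil, Nat.zero_add,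
      List.range_succ, List.foldl_append, List.foldl_cons, List.foldl_nil]
    congr 1
    · apply PySem.List.foldl_congr_mem
      intro acc i hi
      rw [List.getD_append _ _ _ _ (List.mem_range.1 hi)]
    · rw [List.getD_eq_getElem?_getD, List.getElem?_concat_length]
      rfl

-- A's first-strict-improvement scan and B's, over the same score function,
-- stay related: equal scores, and the picks correspond
theorem pv_argmax_rel {γ : Type} (n : Nat) (score : Nat → Nat) (pick : Nat → γ) :
    ((List.range n).foldl (fun (st : Option γ × Nat) i =>
        if score i > st.2 then (some (pick i), score i) else st) (none, 0)).2
      = ((List.range n).foldl (fun (st : Option Nat × Nat) i =>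
        if score i > st.2 then (some i, score i) else st) (none, 0)).2
    ∧ ((((List.range n).foldl (fun (st : Option γ × Nat) i =>
          if score i > st.2 then (some (pick i), score i) else st) (none, 0)).1 = none
        ∧ ((List.range n).foldl (fun (st : Option Nat × Nat) i =>
          if score i > st.2 then (some i, score i) else st) (none, 0)).1 = none)
      ∨ (∃ i, i < n
        ∧ ((List.range n).foldl (fun (st : Option Nat × Nat) i =>
            if score i > st.2 then (some i, score i) else st) (none, 0)).1 = some i
        ∧ ((List.range n).foldl (fun (st : Option γ × Nat) i =>
            if score i > st.2 then (some (pick i), score i) else st) (none, 0)).1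
              = some (pick i)
        ∧ ((List.range n).foldl (fun (st : Option γ × Nat) i =>
            if score i > st.2 then (some (pick i), score i) else st) (none, 0)).2 = score i
        ∧ 0 < ((List.range n).foldl (fun (st : Option γ × Nat) i =>
            if score i > st.2 then (some (pick i), score i) else st) (none, 0)).2)) := by
  induction n with
  | zero => simp
  | succ n ih =>
    obtain ⟨h2, hdis⟩ := ih
    rw [List.range_succ]
    simp only [List.foldl_append, List.foldl_cons, List.foldl_nil]
    by_cases hgt : score n >
        ((List.range n).foldl (fun (st : Option γ × Nat) i =>
          if score i > st.2 then (some (pick i), score i) else st) (none, 0)).2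
    · rw [if_pos hgt, if_pos (h2 ▸ hgt)]
      refine ⟨rfl, Or.inr ⟨n, Nat.lt_succ_self n, rfl, rfl, rfl, ?_⟩⟩
      exact Nat.lt_of_le_of_lt (Nat.zero_le _) hgt
    · rw [if_neg hgt, if_neg (h2 ▸ hgt)]
      refine ⟨h2, ?_⟩
      rcases hdis with h | ⟨i, hi, hb, ha, hs, hp⟩
      · exact Or.inl h
      · exact Or.inr ⟨i, Nat.lt_succ_of_lt hi, hb, ha, hs, hp⟩

-- A's "not yet assigned in the tray household" filter is a plain
-- complement filter against the matched set
theorem pv_unmatched_eq (matched : PySem.Set String) (best : List (String × String)) :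
    best.filter (fun p => !((PySem.Set.ofList ((best.map Prod.fst).filter
        (fun n => matched.contains n))).contains p.1))
    = best.filter (fun p => !(matched.contains p.1)) := by
  apply List.filter_congr
  intro p hp
  congr 1
  have hmem : p.1 ∈ best.map Prod.fst := List.mem_map_of_mem hp
  by_cases hm : matched.contains p.1
  · rw [hm]
    exact (PySem.Set.contains_iff _ _).2 (by
      rw [PySem.Set.mem_ofList, List.mem_filter]
      exact ⟨hmem, hm⟩)
  · simp only [Bool.not_eq_true] at hm
    rw [hm]
    rw [Bool.eq_false_iff]
    intro hc
    have hx := (PySem.Set.contains_iff _ _).1 hc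
    rw [PySem.Set.mem_ofList, List.mem_filter] at hx
    rw [hx.2] at hm
    exact Bool.true_eq_false ▸ hm

theorem pvB_counts_length (idx : PySem.Dict String (List Nat)) (nT : Nat)
    (m : PySem.Set String) : (pvB_counts idx nT m).length = nT := by
  unfold pvB_counts
  have aux : ∀ (l : List String) (cs : List Nat),
      (l.foldl (fun cs n => (idx.getD n []).foldl (fun cs i => pvBump cs i) cs) cs).length
        = cs.length := by
    intro l
    induction l with
    | nil => intro cs; rfl
    | cons n ms ih => intro cs; rw [List.foldl_cons, ih, foldl_pvBump_length]
  rw [aux, List.length_replicate]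

theorem pv_step_eq (pid : PySem.Dict String String) (trays : List (List (String × String)))
    (extra : PySem.Dict String String) (hh : String × List String) :
    pvA_step pid trays extra hh = pvB_step pid trays (pvB_index trays) extra hh := by
  simp only [pvA_step, pvB_step]
  rw [pv_split, PySem.Set.update_empty, List.nil_append]
  set matched := PySem.Set.ofList (hh.2.filter (fun n => pid.contains n)) with hMdef
  set unmatched := hh.2.filter (fun n => !(pid.contains n)) with hUdef
  by_cases hE : unmatched.isEmpty
  · simp only [hE, if_true]
  · simp only [hE, if_false, Bool.false_eq_true]
    have hA : pvA_best matched trays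
        = (List.range trays.length).foldl
            (fun (st : Option (List (String × String)) × Nat) i =>
              if (matched.filter (fun n => decide (n ∈ pvNames trays i))).length > st.2
              then (some (trays.getD i []),
                    (matched.filter (fun n => decide (n ∈ pvNames trays i))).length)
              else st) (none, 0) := by
      unfold pvA_best
      rw [pv_foldl_eq_range _ trays ([] : List (String × String))]
      apply PySem.List.foldl_congr_mem
      intro acc i _
      simp only [pv_score_eq, pvNames]
      rfl
    have hB : pvB_argmax (pvB_counts (pvB_index trays) trays.length matched)
        = (List.range trays.length).foldl
            (fun (st : Option Nat × Nat) i =>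
              if (matched.filter (fun n => decide (n ∈ pvNames trays i))).length > st.2
              then (some i,
                    (matched.filter (fun n => decide (n ∈ pvNames trays i))).length)
              else st) (none, 0) := by
      unfold pvB_argmax
      rw [pvB_counts_length]
      apply PySem.List.foldl_congr_mem
      intro acc i hi
      rw [pvB_counts_getD trays matched i (List.mem_range.1 hi)]
    obtain ⟨h2, hdis⟩ := pv_argmax_rel trays.length
      (fun i => (matched.filter (fun n => decide (n ∈ pvNames trays i))).length)
      (fun i => trays.getD i [])
    rw [← hA, ← hB] at hdis
    rcases hdis with ⟨ha, hb⟩ | ⟨i, hi, hb, ha, hs, hp⟩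
    · rw [ha, hb]
    · rw [ha, hb]
      dsimp only
      have hscore : 0 < (List.filter (fun n => decide (n ∈ pvNames trays i)) matched).length := by
        rw [← hs]; exact hp
      have hgetne : trays.getD i [] ≠ [] := by
        rcases List.exists_mem_of_length_pos hscore with ⟨n, hn⟩
        have hd := (List.mem_filter.1 hn).2
        intro h0
        rw [pvNames, h0] at hd
        simp at hd
      have hisE : (trays.getD i []).isEmpty = false := by
        rcases h' : (trays.getD i []).isEmpty with _ | _
        · rfl
        · exact absurd (List.isEmpty_iff.mp h') hgetne
      have hcond : ((trays.getD i []).isEmpty || (pvA_best matched trays).2 == 0) = false := by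
        rw [hisE, Bool.false_or, beq_eq_false_iff_ne]
        exact Nat.pos_iff_ne_zero.mp hp
      rw [hcond]
      simp only [Bool.false_eq_true, if_false]
      rw [pv_unmatched_eq matched (trays.getD i [])]
      have hUne : unmatched ≠ [] := by
        intro h0; rw [h0] at hE; exact hE rfl
      have h1 : decide (1 ≤ unmatched.length) = true := by
        simp only [decide_eq_true_eq]
        exact Nat.one_le_iff_ne_zero.2
          (fun h0 => hUne (List.eq_nil_of_length_eq_zero h0))
      rw [h1, Bool.and_true]
-- ===== VERDICT (by name: the statement is the Claim_ definition above) =====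
theorem match_renamed_sims_spec : Claim_equal_match_renamed_sims := by
  intro pi trays saves _
  unfold Spec_match_renamed_sims match_renamed_sims match_renamed_sims_alt
  simp only
  have h : pvA_step (PySem.Dict.mk pi) trays = pvB_step (PySem.Dict.mk pi) trays (pvB_index trays) := by
    funext extra hh; exact pv_step_eq _ _ _ _
  rw [h]
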